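-- pv_equiv track=rewrite | github.com/wangyingyingyu/autotest | holiday/work_08.py | count_keypresses
-- ===== SOURCE A (Python) =====
-- def count_keypresses(s):
--     keypresses = 0
--     caps_lock = False  # 初始状态为小写
--
--     for char in s:
--         if char.islower():  # 当前字符是小写字母
--             if caps_lock:  # 如果当前是大写状态，需要按Caps Lock
--                 keypresses += 1  # 按Caps Lock开关
--                 caps_lock = not caps_lock  # 切换状态
--             keypresses += 1  # 输入小写字母
--
--         elif char.isupper():  # 当前字符是大写字母
--             if not caps_lock:  # 如果当前是小写状态，需要按Caps Lock
--                 keypresses += 1  # 按Caps Lock开关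
--                 caps_lock = not caps_lock  # 切换状态
--             keypresses += 1  # 输入大写字母
--
--     return keypresses
-- ===== SOURCE B (Python) =====
-- def count_keypresses(s):
--     # keypresses = cased letters + 2 * (number of maximal uppercase runs) - (1 if the
--     # last cased letter is uppercase): each uppercase run costs one Caps Lock press to
--     # enter and one to leave, except a trailing run which is never left.
--     flags = [c.isupper() for c in s if c.islower() or c.isupper()]
--     ustarts = sum(f and not p for p, f in zip([False] + flags, flags))
--     return len(flags) + 2 * ustarts - (1 if flags and flags[-1] else 0)
-- ===== Notes on version B (the rewrite author's own statement) =====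
-- stated objective: alternative
-- what changed: Replaces A's caps-lock state machine with a run-counting formula: keypresses = number of cased letters + 2 * (number of maximal uppercase runs, counted via adjacent zip) - 1 if the last cased letter is uppercase.
import Mathlib
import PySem

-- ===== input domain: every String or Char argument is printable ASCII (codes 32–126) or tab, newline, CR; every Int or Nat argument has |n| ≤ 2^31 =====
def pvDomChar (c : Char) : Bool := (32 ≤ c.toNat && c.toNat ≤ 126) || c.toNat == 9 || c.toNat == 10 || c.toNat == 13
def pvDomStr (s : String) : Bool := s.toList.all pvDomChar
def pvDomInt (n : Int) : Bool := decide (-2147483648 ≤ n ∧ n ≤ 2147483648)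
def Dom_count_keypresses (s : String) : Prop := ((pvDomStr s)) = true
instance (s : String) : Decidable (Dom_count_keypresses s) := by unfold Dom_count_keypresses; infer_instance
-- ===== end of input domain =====

-- B replaces A's per-character caps-lock state machine by a run-counting formula:
-- cased letters + 2 * (number of maximal uppercase runs) - 1 if the last cased letter is upper.

-- ===== PORT A =====
/-- one iteration of A's loop body (keypresses, caps_lock) -/
def pvStepA (st : Int × Bool) (char : Char) : Int × Bool :=
  if PySem.Chars.islower char then
    let st := if st.2 then (st.1 + 1, !st.2) else st
    (st.1 + 1, st.2)
  else if PySem.Chars.isupper char then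
    let st := if !st.2 then (st.1 + 1, !st.2) else st
    (st.1 + 1, st.2)
  else st

def count_keypresses (s : String) : Int :=
  (s.toList.foldl pvStepA (0, false)).1

-- ===== PORT B =====
def count_keypresses_alt (s : String) : Int :=
  let flags := (s.toList.filter (fun c => PySem.Chars.islower c || PySem.Chars.isupper c)).map PySem.Chars.isupper
  let ustarts : Int := (((false :: flags).zip flags).filter (fun pf => pf.2 && !pf.1)).length
  (flags.length : Int) + 2 * ustarts - (if flags.getLastD false then 1 else 0)

-- ===== PRECONDITION & SPEC =====
def Spec_count_keypresses (s : String) (out : Int) : Prop := out = count_keypresses_alt s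
instance (s : String) (out : Int) : Decidable (Spec_count_keypresses s out) := by unfold Spec_count_keypresses; infer_instance

-- ===== CLAIM (what is proved, stated in full; the proofs are below) =====
def Claim_equal_count_keypresses : Prop := ∀ (s : String), Dom_count_keypresses s → Spec_count_keypresses s (count_keypresses s)

-- ===== LEMMAS AND PROOFS =====

/-- number of case transitions in `fs` starting from state `b` -/
def pvTrans : Bool → List Bool → Int
  | _, [] => 0
  | b, f :: fs => (if f ≠ b then 1 else 0) + pvTrans f fs

/-- number of uppercase-run starts in `fs` when the flag before is `b` -/
def pvUStarts : Bool → List Bool → Int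
  | _, [] => 0
  | b, f :: fs => (if f && !b then 1 else 0) + pvUStarts f fs

/-- the case-flag list of the cased characters of `cs` -/
def pvFlags (cs : List Char) : List Bool :=
  (cs.filter (fun c => PySem.Chars.islower c || PySem.Chars.isupper c)).map PySem.Chars.isupper

lemma pvA_fold (cs : List Char) (caps : Bool) (acc : Int) :
    (cs.foldl pvStepA (acc, caps)).1
    = acc + (pvFlags cs).length + pvTrans caps (pvFlags cs) := by
  induction cs generalizing caps acc with
  | nil => simp [pvFlags, pvTrans]
  | cons c cs ih =>
    simp only [List.foldl_cons]
    by_cases hl : PySem.Chars.islower c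
    · have hu : PySem.Chars.isupper c = false := by
        simp [PySem.Chars.islower, PySem.Chars.isupper, Char.le_def,
          UInt32.le_iff_toNat_le] at hl ⊢
        intro h
        omega
      cases caps <;>
        simp [pvStepA, pvFlags, pvTrans, hl, hu, List.filter_cons, ih] <;> ring
    · by_cases hu : PySem.Chars.isupper c
      · cases caps <;>
          simp [pvStepA, pvFlags, pvTrans, hl, hu, List.filter_cons, ih] <;> ring
      · simp [pvStepA, pvFlags, pvTrans, hl, hu, List.filter_cons, ih]

lemma pvZip_ustarts (fs : List Bool) (b : Bool) :
    ((((b :: fs).zip fs).filter (fun pf => pf.2 && !pf.1)).length : Int)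
    = pvUStarts b fs := by
  induction fs generalizing b with
  | nil => simp [pvUStarts]
  | cons f fs ih =>
    simp only [List.zip_cons_cons, List.filter_cons]
    by_cases h : (f && !b) = true <;> simp [h, pvUStarts, ih] <;> ring

lemma pvTrans_formula (fs : List Bool) (b : Bool) :
    pvTrans b fs + (if fs.getLastD b then 1 else 0)
    = 2 * pvUStarts b fs + (if b then 1 else 0) := by
  induction fs generalizing b with
  | nil => simp [pvTrans, pvUStarts]
  | cons f fs ih =>
    rw [List.getLastD_cons]
    simp only [pvTrans, pvUStarts]
    have := ih f
    cases b <;> cases f <;> simp_all <;> omega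

-- ===== VERDICT (by name: the statement is the Claim_ definition above) =====
theorem count_keypresses_spec : Claim_equal_count_keypresses := by
  intro s _
  unfold Spec_count_keypresses count_keypresses count_keypresses_alt
  rw [pvA_fold]
  show 0 + ((pvFlags s.toList).length : Int) + pvTrans false (pvFlags s.toList)
      = ((pvFlags s.toList).length : Int)
        + 2 * ((((false :: pvFlags s.toList).zip (pvFlags s.toList)).filter
            (fun pf => pf.2 && !pf.1)).length : Int)
        - (if (pvFlags s.toList).getLastD false then 1 else 0)
  rw [pvZip_ustarts]
  have h := pvTrans_formula (pvFlags s.toList) false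
  simp only [if_neg Bool.false_ne_true] at h
  omega
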